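-- pv_equiv track=rewrite | github.com/vvgupta01/Nim-QLearning | ExpertAgent.py | piles_near_end
-- ===== SOURCE A (Python) =====
-- def piles_near_end(board):
--     pile, one_piles = 0, 0
--     for i in range(len(board)):
--         if board[i] == 1:
--             one_piles += 1
--         elif board[i] > 1:
--             pile = i
--     return pile, one_piles
-- ===== SOURCE B (Python) =====
-- def piles_near_end(board):
--     one_piles = board.count(1)
--     pile = 0
--     for i in range(len(board) - 1, -1, -1):
--         if board[i] > 1:
--             pile = i
--             break
--     return pile, one_piles
-- ===== Notes on version B (the rewrite author's own statement) =====
-- stated objective: alternative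
-- what changed: Replaces the single fused forward pass (updating both pile and the 1-count per element) with a direct count(1) plus a separate reverse early-exit scan for the last pile > 1.
import Mathlib
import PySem

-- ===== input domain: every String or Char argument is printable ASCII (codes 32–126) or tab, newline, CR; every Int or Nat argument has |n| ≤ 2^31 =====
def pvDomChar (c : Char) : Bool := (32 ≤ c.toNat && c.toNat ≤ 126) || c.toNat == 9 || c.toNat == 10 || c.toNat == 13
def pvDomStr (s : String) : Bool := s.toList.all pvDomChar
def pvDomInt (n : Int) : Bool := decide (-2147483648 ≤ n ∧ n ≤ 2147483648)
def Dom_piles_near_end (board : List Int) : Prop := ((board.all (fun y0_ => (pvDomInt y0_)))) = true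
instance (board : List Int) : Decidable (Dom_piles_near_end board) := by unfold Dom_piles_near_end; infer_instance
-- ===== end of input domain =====

-- ===== PORT A =====
-- A: one forward pass over indices, updating (pile, one_piles)
def piles_near_end (board : List Int) : Int × Int :=
  (List.range board.length).foldl
    (fun st i =>
      let x := board.getD i 0
      if x == 1 then (st.1, st.2 + 1)
      else if x > 1 then ((i : Int), st.2)
      else st)
    (0, 0)

-- ===== PORT B =====
-- B: count(1) directly, then a reverse early-exit scan for the last index with board[i] > 1.
-- pvLastBig board m scans indices m-1, m-2, …, 0, returning the first (highest) with value > 1, else 0,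
-- exactly B's `for i in range(len-1, -1, -1): if board[i] > 1: pile = i; break`.
def pvLastBig (board : List Int) : Nat → Int
  | 0 => 0
  | n + 1 => if board.getD n 0 > 1 then (n : Int) else pvLastBig board n

def piles_near_end_alt (board : List Int) : Int × Int :=
  (pvLastBig board board.length, (board.count 1 : Int))

-- ===== PRECONDITION & SPEC =====
def Spec_piles_near_end (board : List Int) (out : Int × Int) : Prop := out = piles_near_end_alt board
instance (board : List Int) (out : Int × Int) : Decidable (Spec_piles_near_end board out) := by unfold Spec_piles_near_end; infer_instance

-- ===== CLAIM (what is proved, stated in full; the proofs are below) =====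
def Claim_equal_piles_near_end : Prop := ∀ (board : List Int), Dom_piles_near_end board → Spec_piles_near_end board (piles_near_end board)

-- ===== LEMMAS AND PROOFS =====

-- ===== VERDICT (by name: the statement is the Claim_ definition above) =====
lemma pv_foldA (board : List Int) (m : Nat) (hm : m ≤ board.length) :
    (List.range m).foldl
      (fun st i =>
        let x := board.getD i 0
        if x == 1 then (st.1, st.2 + 1)
        else if x > 1 then ((i : Int), st.2)
        else st)
      ((0 : Int), (0 : Int))
    = (pvLastBig board m, ((board.take m).count 1 : Int)) := by
  induction m with
  | zero => simp [pvLastBig]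
  | succ n ih =>
    have hn : n ≤ board.length := Nat.le_of_succ_le hm
    have hlt : n < board.length := hm
    rw [List.range_succ, List.foldl_append, ih hn]
    have htake : board.take (n + 1) = board.take n ++ [board[n]] := by
      rw [List.take_add_one]
      simp [List.getElem?_eq_getElem hlt]
    have hgetD : board.getD n 0 = board[n] := List.getD_eq_getElem board 0 hlt
    simp only [List.foldl_cons, List.foldl_nil, htake, List.count_append,
      List.count_singleton, pvLastBig, hgetD]
    by_cases h1 : board[n] = 1
    · simp [h1]
    · have hne : (board[n] == 1) = false := by simp [h1]
      by_cases h2 : board[n] > 1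
      · simp [hne, h2]
      · simp [hne, h2]

theorem piles_near_end_spec : Claim_equal_piles_near_end := by
  intro board _
  unfold Spec_piles_near_end piles_near_end piles_near_end_alt
  rw [pv_foldA board board.length le_rfl]
  simp
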